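-- pv_equiv track=rewrite | github.com/venky1908112-droid/DSA | 4268-integers-with-multiple-sum-of-two-cubes/integers-with-multiple-sum-of-two-cubes.py | findGoodIntegers
-- ===== SOURCE A (Python) =====
-- from collections import defaultdict
--
-- def findGoodIntegers(n):
--     cube_count = defaultdict(int)
--
--     a = 1
--     while a**3 <= n:
--         b = a
--         while a**3 + b**3 <= n:
--             x = a**3 + b**3
--             cube_count[x] += 1
--             b += 1
--         a += 1
--
--     ans = []
--     for num in cube_count:
--         if cube_count[num] >= 2:
--             ans.append(num)
--
--     return sorted(ans)
-- ===== SOURCE B (Python) =====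
-- def findGoodIntegers(n):
--     sums = []
--     a = 1
--     while a**3 <= n:
--         b = a
--         while a**3 + b**3 <= n:
--             sums.append(a**3 + b**3)
--             b += 1
--         a += 1
--     sums.sort()
--     ans = []
--     i = 0
--     m = len(sums)
--     while i < m:
--         j = i + 1
--         while j < m and sums[j] == sums[i]:
--             j += 1
--         if j - i >= 2:
--             ans.append(sums[i])
--         i = j
--     return ans
-- ===== Notes on version B (the rewrite author's own statement) =====
-- stated objective: alternative
-- what changed: Replaces the defaultdict multiplicity counter and key-filter pass by a flat list of cube sums that is sorted once and scanned linearly for runs of length >= 2 (sort-then-scan duplicate detection instead of hash counting).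
import Mathlib
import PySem

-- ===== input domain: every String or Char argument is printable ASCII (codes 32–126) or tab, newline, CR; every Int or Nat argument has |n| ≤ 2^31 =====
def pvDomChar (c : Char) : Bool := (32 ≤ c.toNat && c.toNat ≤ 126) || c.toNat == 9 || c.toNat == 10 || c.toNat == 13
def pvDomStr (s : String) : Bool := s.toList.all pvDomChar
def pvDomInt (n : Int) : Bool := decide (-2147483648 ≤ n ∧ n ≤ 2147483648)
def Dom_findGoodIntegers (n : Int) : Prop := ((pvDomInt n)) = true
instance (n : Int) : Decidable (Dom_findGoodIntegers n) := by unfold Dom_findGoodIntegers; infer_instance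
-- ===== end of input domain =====

-- B replaces A's defaultdict counter by a flat sum list, sorted once and scanned for runs of length ≥ 2 (alternative algorithm, similar cost).

-- ===== PORT A =====
-- inner 'while a**3 + b**3 <= n' loop: cube_count[x] += 1 on the defaultdict; fuel only makes the loop total
def pvInnerA (n a : Int) : Nat → Int → PySem.Dict Int Int → PySem.Dict Int Int
  | 0, _, d => d
  | fuel + 1, b, d =>
    if a ^ 3 + b ^ 3 ≤ n then
      pvInnerA n a fuel (b + 1) (d.modify (a ^ 3 + b ^ 3) 0 (· + 1))
    else d

-- outer 'while a**3 <= n' loop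
def pvOuterA (n : Int) : Nat → Int → PySem.Dict Int Int → PySem.Dict Int Int
  | 0, _, d => d
  | fuel + 1, a, d =>
    if a ^ 3 ≤ n then pvOuterA n fuel (a + 1) (pvInnerA n a (n.toNat + 1) a d)
    else d

def findGoodIntegers (n : Int) : List Int :=
  let cubeCount := pvOuterA n (n.toNat + 1) 1 PySem.Dict.empty
  let ans := cubeCount.keys.foldl
    (fun acc num => if 2 ≤ cubeCount.getD num 0 then acc ++ [num] else acc) []
  PySem.List.sorted ans (fun x => x) false

-- ===== PORT B =====
def pvInnerB (n a : Int) : Nat → Int → List Int → List Int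
  | 0, _, l => l
  | fuel + 1, b, l =>
    if a ^ 3 + b ^ 3 ≤ n then pvInnerB n a fuel (b + 1) (l ++ [a ^ 3 + b ^ 3])
    else l

def pvOuterB (n : Int) : Nat → Int → List Int → List Int
  | 0, _, l => l
  | fuel + 1, a, l =>
    if a ^ 3 ≤ n then pvOuterB n fuel (a + 1) (pvInnerB n a (n.toNat + 1) a l)
    else l

-- the index scan over the sorted list, expressed as run grouping: j advances past the
-- run of elements equal to sums[i]; the run is emitted once iff its length is ≥ 2
def pvRunScan : List Int → List Int
  | [] => []
  | x :: xs =>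
    let rst := xs.dropWhile (fun y => y == x)
    if (xs.takeWhile (fun y => y == x)).length + 1 ≥ 2 then x :: pvRunScan rst
    else pvRunScan rst
termination_by l => l.length
decreasing_by
  all_goals
    have := List.length_dropWhile_le (fun y => y == x) xs
    simp only [List.length_cons]
    omega

def findGoodIntegers_alt (n : Int) : List Int :=
  let sums := PySem.List.sorted (pvOuterB n (n.toNat + 1) 1 []) (fun x => x) false
  pvRunScan sums

-- ===== PRECONDITION & SPEC =====
def Spec_findGoodIntegers (n : Int) (out : List Int) : Prop := out = findGoodIntegers_alt n
instance (n : Int) (out : List Int) : Decidable (Spec_findGoodIntegers n out) := by unfold Spec_findGoodIntegers; infer_instance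

-- ===== CLAIM (what is proved, stated in full; the proofs are below) =====
def Claim_equal_findGoodIntegers : Prop := ∀ (n : Int), Dom_findGoodIntegers n → Spec_findGoodIntegers n (findGoodIntegers n)

-- ===== LEMMAS AND PROOFS =====

-- the dict/list loop invariant: d counts exactly the multiset of l
def pvInv (d : PySem.Dict Int Int) (l : List Int) : Prop :=
  (∀ x, d.getD x 0 = (l.count x : Int)) ∧ (∀ x, x ∈ d.keys ↔ x ∈ l) ∧ d.keys.Nodup

theorem pvInv_step {d : PySem.Dict Int Int} {l : List Int} (h : pvInv d l) (x : Int) :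
    pvInv (d.modify x 0 (· + 1)) (l ++ [x]) := by
  obtain ⟨hc, hk, hn⟩ := h
  refine ⟨?_, ?_, ?_⟩
  · intro y
    rw [PySem.Dict.getD_modify]
    by_cases hyx : y = x
    · simp [hyx, hc, List.count_append]
    · rw [if_neg hyx, hc, List.count_append, List.count_singleton,
        if_neg (by simpa using fun h : x = y => hyx h.symm)]
      simp
  · intro y
    rw [PySem.Dict.keys_modify, PySem.Dict.mem_keys_insert]
    by_cases hyx : y = x <;> simp [hyx, hk]
  · rw [PySem.Dict.keys_modify]
    exact PySem.Dict.nodup_keys_insert _ _ _ hn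

theorem pvInner_inv (n a : Int) (fuel : Nat) :
    ∀ (b : Int) (d : PySem.Dict Int Int) (l : List Int), pvInv d l →
      pvInv (pvInnerA n a fuel b d) (pvInnerB n a fuel b l) := by
  induction fuel with
  | zero => intro b d l h; exact h
  | succ f ih =>
    intro b d l h
    simp only [pvInnerA, pvInnerB]
    split
    · exact ih (b + 1) _ _ (pvInv_step h _)
    · exact h

theorem pvOuter_inv (n : Int) (fuel : Nat) :
    ∀ (a : Int) (d : PySem.Dict Int Int) (l : List Int), pvInv d l →
      pvInv (pvOuterA n fuel a d) (pvOuterB n fuel a l) := by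
  induction fuel with
  | zero => intro a d l h; exact h
  | succ f ih =>
    intro a d l h
    simp only [pvOuterA, pvOuterB]
    split
    · exact ih (a + 1) _ _ (pvInner_inv n a _ a d l h)
    · exact h

-- runScan output is a subset of its input
theorem pvRunScan_subset : ∀ (s : List Int), ∀ y ∈ pvRunScan s, y ∈ s := by
  intro s
  induction s using pvRunScan.induct with
  | case1 => intro y hy; simp [pvRunScan] at hy
  | case2 x xs rst hcond ih =>
    intro y hy
    simp only [pvRunScan] at hy
    rw [if_pos hcond] at hy
    rcases List.mem_cons.mp hy with h | h
    · simp [h]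
    · exact List.mem_cons_of_mem _ ((List.dropWhile_sublist _).mem (ih y h))
  | case3 x xs rst hcond ih =>
    intro y hy
    simp only [pvRunScan] at hy
    rw [if_neg hcond] at hy
    exact List.mem_cons_of_mem _ ((List.dropWhile_sublist _).mem (ih y hy))

-- on a ≤-sorted list after dropping the leading x's, everything is > x
theorem pvDrop_gt : ∀ (xs : List Int) (x : Int), (∀ y ∈ xs, x ≤ y) → xs.Pairwise (· ≤ ·) →
    ∀ y ∈ xs.dropWhile (fun y => y == x), x < y := by
  intro xs
  induction xs with
  | nil => intro x _ _ y hy; simp at hy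
  | cons z t ih =>
    intro x hle hpw y hy
    by_cases hzx : z = x
    · rw [List.dropWhile_cons_of_pos (by simp [hzx])] at hy
      exact ih x (fun u hu => hle u (List.mem_cons_of_mem _ hu))
        (List.Pairwise.sublist (List.sublist_cons_self _ _) hpw) y hy
    · rw [List.dropWhile_cons_of_neg (by simp [hzx])] at hy
      have hxz : x < z := lt_of_le_of_ne (hle z List.mem_cons_self) (fun h => hzx h.symm)
      rcases List.mem_cons.mp hy with h | h
      · omega
      · exact lt_of_lt_of_le hxz ((List.pairwise_cons.mp hpw).1 y h)

-- membership in the run scan of a ≤-sorted list is "count ≥ 2"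
theorem pvRunScan_mem : ∀ (s : List Int), s.Pairwise (· ≤ ·) →
    ∀ y, (y ∈ pvRunScan s ↔ 2 ≤ s.count y) := by
  intro s
  induction s using pvRunScan.induct with
  | case1 => intro _ y; simp [pvRunScan]
  | case2 x xs rst hcond ih =>
    intro hpw y
    have hxle : ∀ u ∈ xs, x ≤ u := (List.pairwise_cons.mp hpw).1
    have hpw' : xs.Pairwise (· ≤ ·) := (List.pairwise_cons.mp hpw).2
    have hgt : ∀ u ∈ xs.dropWhile (fun y => y == x), x < u := pvDrop_gt xs x hxle hpw'
    have hrpw : (xs.dropWhile (fun y => y == x)).Pairwise (· ≤ ·) :=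
      List.Pairwise.sublist (List.dropWhile_sublist _) hpw'
    have hsplit : xs = xs.takeWhile (fun y => y == x) ++ xs.dropWhile (fun y => y == x) :=
      (List.takeWhile_append_dropWhile ..).symm
    have htake : ∀ u ∈ xs.takeWhile (fun y => y == x), u = x := by
      intro u hu
      simpa using List.mem_takeWhile_imp hu
    simp only [pvRunScan]
    rw [if_pos hcond]
    by_cases hyx : y = x
    · subst hyx
      have hcr : (xs.dropWhile (fun u => u == y)).count y = 0 :=
        List.count_eq_zero.mpr (fun hy => lt_irrefl y (hgt y hy))
      have hct : (xs.takeWhile (fun u => u == y)).count y = (xs.takeWhile (fun u => u == y)).length :=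
        List.count_eq_length.mpr (fun b hb => (htake b hb).symm)
      have hcount : (y :: xs).count y = (xs.takeWhile (fun u => u == y)).length + 1 := by
        rw [List.count_cons_self]
        conv_lhs => rw [hsplit]
        rw [List.count_append, hct, hcr]
      constructor
      · intro _; omega
      · intro _; exact List.mem_cons_self
    · have hcount : (x :: xs).count y = (xs.dropWhile (fun u => u == x)).count y := by
        rw [List.count_cons_of_ne (Ne.symm hyx)]
        conv_lhs => rw [hsplit]
        rw [List.count_append]
        have : (xs.takeWhile (fun u => u == x)).count y = 0 :=
          List.count_eq_zero.mpr (fun hy => hyx (htake y hy))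
        omega
      rw [hcount]
      constructor
      · intro hy
        rcases List.mem_cons.mp hy with h | h
        · exact absurd h hyx
        · exact (ih hrpw y).mp h
      · intro h2
        exact List.mem_cons_of_mem _ ((ih hrpw y).mpr h2)
  | case3 x xs rst hcond ih =>
    intro hpw y
    have hxle : ∀ u ∈ xs, x ≤ u := (List.pairwise_cons.mp hpw).1
    have hpw' : xs.Pairwise (· ≤ ·) := (List.pairwise_cons.mp hpw).2
    have hgt : ∀ u ∈ xs.dropWhile (fun y => y == x), x < u := pvDrop_gt xs x hxle hpw'
    have hrpw : (xs.dropWhile (fun y => y == x)).Pairwise (· ≤ ·) :=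
      List.Pairwise.sublist (List.dropWhile_sublist _) hpw'
    have htake0 : xs.takeWhile (fun y => y == x) = [] := by
      by_contra h
      have : 0 < (xs.takeWhile (fun y => y == x)).length := List.length_pos_iff.mpr h
      omega
    have hxs : xs = xs.dropWhile (fun y => y == x) := by
      conv_lhs => rw [(List.takeWhile_append_dropWhile (p := fun y => y == x) (l := xs)).symm]
      simp [htake0]
    simp only [pvRunScan]
    rw [if_neg hcond]
    by_cases hyx : y = x
    · subst hyx
      have hcr : xs.count y = 0 := by
        rw [hxs]; exact List.count_eq_zero.mpr (fun hy => lt_irrefl y (hgt y hy))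
      rw [List.count_cons_self, hcr]
      constructor
      · intro hy
        have hmem := pvRunScan_subset _ y hy
        exact absurd (hgt y hmem) (lt_irrefl y)
      · omega
    · rw [List.count_cons_of_ne (Ne.symm hyx)]
      conv_rhs => rw [hxs]
      exact ih hrpw y

-- the run scan of a ≤-sorted list is strictly increasing
theorem pvRunScan_pairwise : ∀ (s : List Int), s.Pairwise (· ≤ ·) →
    (pvRunScan s).Pairwise (· < ·) := by
  intro s
  induction s using pvRunScan.induct with
  | case1 => intro _; simp [pvRunScan]
  | case2 x xs rst hcond ih =>
    intro hpw
    have hxle : ∀ u ∈ xs, x ≤ u := (List.pairwise_cons.mp hpw).1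
    have hpw' : xs.Pairwise (· ≤ ·) := (List.pairwise_cons.mp hpw).2
    have hgt : ∀ u ∈ xs.dropWhile (fun y => y == x), x < u := pvDrop_gt xs x hxle hpw'
    have hrpw : (xs.dropWhile (fun y => y == x)).Pairwise (· ≤ ·) :=
      List.Pairwise.sublist (List.dropWhile_sublist _) hpw'
    simp only [pvRunScan]
    rw [if_pos hcond]
    exact List.pairwise_cons.mpr ⟨fun y hy => hgt y (pvRunScan_subset _ y hy), ih hrpw⟩
  | case3 x xs rst hcond ih =>
    intro hpw
    have hpw' : xs.Pairwise (· ≤ ·) := (List.pairwise_cons.mp hpw).2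
    have hrpw : (xs.dropWhile (fun y => y == x)).Pairwise (· ≤ ·) :=
      List.Pairwise.sublist (List.dropWhile_sublist _) hpw'
    simp only [pvRunScan]
    rw [if_neg hcond]
    exact ih hrpw

-- ===== VERDICT (by name: the statement is the Claim_ definition above) =====
theorem findGoodIntegers_spec : Claim_equal_findGoodIntegers := by
  intro n _
  unfold Spec_findGoodIntegers findGoodIntegers findGoodIntegers_alt
  have hInv : pvInv (pvOuterA n (n.toNat + 1) 1 PySem.Dict.empty)
      (pvOuterB n (n.toNat + 1) 1 []) := by
    apply pvOuter_inv
    refine ⟨?_, ?_, ?_⟩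
    · intro x; simp [PySem.Dict.getD_empty]
    · intro x; simp [PySem.Dict.keys_empty]
    · simp [PySem.Dict.keys_empty]
  set d := pvOuterA n (n.toNat + 1) 1 PySem.Dict.empty with hd
  set l := pvOuterB n (n.toNat + 1) 1 [] with hl
  obtain ⟨hc, hk, hn⟩ := hInv
  show PySem.List.sorted
      (d.keys.foldl (fun acc num => if 2 ≤ d.getD num 0 then acc ++ [num] else acc) [])
      (fun x => x) false = pvRunScan (PySem.List.sorted l (fun x => x) false)
  rw [PySem.List.foldl_append_ite_eq_filter]
  simp only [List.nil_append]
  set ys := pvRunScan (PySem.List.sorted l (fun x => x) false) with hys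
  have hspw : (PySem.List.sorted l (fun x => x) false).Pairwise (· ≤ ·) :=
    PySem.List.sorted_pairwise l (fun x => x)
  have hperm : (PySem.List.sorted l (fun x => x) false).Perm l := PySem.List.sorted_perm l _ _
  have hysmem : ∀ y, y ∈ ys ↔ 2 ≤ l.count y := by
    intro y
    rw [hys, pvRunScan_mem _ hspw y, hperm.count_eq]
  have hyspw : ys.Pairwise (· < ·) := pvRunScan_pairwise _ hspw
  apply PySem.List.sorted_eq_of_perm_of_pairwise_lt
  · -- ys is a permutation of the filtered keys
    apply (List.perm_ext_iff_of_nodup (hyspw.imp ne_of_lt) (hn.filter _)).mpr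
    intro y
    rw [hysmem y, List.mem_filter]
    constructor
    · intro h2
      refine ⟨(hk y).mpr ?_, by simpa [hc y] using h2⟩
      exact List.count_pos_iff.mp (by omega)
    · rintro ⟨_, h⟩
      have := hc y
      simp at h
      omega
  · exact hyspw
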